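-- pv_equiv track=rewrite | github.com/Davi-Mancebo/magic-all-cards | magic_all_cards.py | get_type_folder_name
-- ===== SOURCE A (Python) =====
-- from typing import Any, Callable, Dict, List, Optional
--
-- TYPE_PRIORITY: List[tuple[str, str]] = [
--     ("Land", "0-Terreno"),
--     ("Creature", "1-Criatura"),
--     ("Planeswalker", "2-Planeswalker"),
--     ("Instant", "3-Instant"),
--     ("Sorcery", "4-Feitiço"),
--     ("Enchantment", "5-Encantamento"),
--     ("Artifact", "6-Artefato"),
--     ("Battle", "7-Batalha"),
-- ]
--
-- def sanitize_filename(name: str) -> str: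
--     """Remove caracteres inválidos mantendo nomes legíveis."""
--
--     safe = "".join(char for char in name if char.isalnum() or char in " -_#")
--     return safe.strip() or "carta"
--
-- def get_type_folder_name(card: Dict[str, Any]) -> str:
--     """Determina pasta de tipo, priorizando Terrenos conforme solicitado."""
--
--     types = card.get("types") or []
--     normalized = [str(t) for t in types]
--
--     for keyword, label in TYPE_PRIORITY:
--         if keyword in normalized:
--             return label
--
--     if normalized:
--         return sanitize_filename(f"8-{normalized[0]}") or "8-Outros"
--
--     return "8-Outros"
-- ===== SOURCE B (Python) =====
-- TYPE_PRIORITY = [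
--     ("Land", "0-Terreno"),
--     ("Creature", "1-Criatura"),
--     ("Planeswalker", "2-Planeswalker"),
--     ("Instant", "3-Instant"),
--     ("Sorcery", "4-Feitiço"),
--     ("Enchantment", "5-Encantamento"),
--     ("Artifact", "6-Artefato"),
--     ("Battle", "7-Batalha"),
-- ]
--
-- RANK = {kw: i for i, (kw, _) in enumerate(TYPE_PRIORITY)}
--
--
-- def sanitize_filename(name):
--     safe = "".join(char for char in name if char.isalnum() or char in " -_#")
--     return safe.strip() or "carta"
--
--
-- def get_type_folder_name(card):
--     normalized = [str(t) for t in (card.get("types") or [])]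
--     ranks = [RANK[t] for t in normalized if t in RANK]
--     if ranks:
--         return TYPE_PRIORITY[min(ranks)][1]
--     if normalized:
--         return sanitize_filename("8-" + normalized[0]) or "8-Outros"
--     return "8-Outros"
-- ===== Notes on version B (the rewrite author's own statement) =====
-- stated objective: alternative
-- what changed: Instead of scanning TYPE_PRIORITY and testing membership in the card's type list per entry, B maps the card's own types through a keyword->rank dict into a list of matched ranks, takes min(ranks) and indexes TYPE_PRIORITY with it.
import Mathlib
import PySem

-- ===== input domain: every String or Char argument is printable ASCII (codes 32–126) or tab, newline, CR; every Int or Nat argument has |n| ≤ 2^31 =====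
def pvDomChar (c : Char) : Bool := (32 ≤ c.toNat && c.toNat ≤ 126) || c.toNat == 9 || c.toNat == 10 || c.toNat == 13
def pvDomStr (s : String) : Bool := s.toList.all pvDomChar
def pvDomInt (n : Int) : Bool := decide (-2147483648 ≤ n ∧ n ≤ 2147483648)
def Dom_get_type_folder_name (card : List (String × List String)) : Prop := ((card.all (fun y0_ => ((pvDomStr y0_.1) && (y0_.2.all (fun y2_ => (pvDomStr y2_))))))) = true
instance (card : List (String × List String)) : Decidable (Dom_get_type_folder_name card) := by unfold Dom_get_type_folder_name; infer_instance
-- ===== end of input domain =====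

-- B replaces A's outer scan over TYPE_PRIORITY (one membership test of normalized per priority
-- entry) by a comprehension mapping the card's own types through a keyword->rank dict, then
-- min(ranks) indexing TYPE_PRIORITY (objective: alternative).

-- ===== PORT A =====
-- shared module helper sanitize_filename (A and B call it unchanged);
-- `char in " -_#"` on a 1-char string is membership of that char in the string's characters.
def pvSanitize (name : String) : String :=
  let safe := String.ofList (name.toList.filter (fun c => PySem.Chars.isalnum c || (" -_#".toList.contains c)))
  let stripped := PySem.Str.strip safe
  if stripped = "" then "carta" else stripped

def pvTypePriority : List (String × String) :=
  [("Land", "0-Terreno"), ("Creature", "1-Criatura"), ("Planeswalker", "2-Planeswalker"),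
   ("Instant", "3-Instant"), ("Sorcery", "4-Feitiço"), ("Enchantment", "5-Encantamento"),
   ("Artifact", "6-Artefato"), ("Battle", "7-Batalha")]

-- A's `for keyword, label in TYPE_PRIORITY: if keyword in normalized: return label`
def pvALoop (normalized : List String) : List (String × String) → Option String
  | [] => none
  | (kw, label) :: rest => if normalized.contains kw then some label else pvALoop normalized rest

def get_type_folder_name (card : List (String × List String)) : String :=
  -- card.get("types") or []  (a missing key and an empty list both give [])
  let types := ((PySem.Dict.mk card).get? "types").getD []
  let normalized := types.map (fun t => t)   -- str(t) on a str is t itself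
  match pvALoop normalized pvTypePriority with
  | some label => label
  | none =>
    match normalized with
    | [] => "8-Outros"
    | t0 :: _ =>
      let s := pvSanitize ("8-" ++ t0)
      if s = "" then "8-Outros" else s   -- `or "8-Outros"`

-- ===== PORT B =====
-- RANK = {kw: i for i, (kw, _) in enumerate(TYPE_PRIORITY)}
def pvRank : PySem.Dict String Int :=
  PySem.Dict.mk
    [("Land", 0), ("Creature", 1), ("Planeswalker", 2), ("Instant", 3),
     ("Sorcery", 4), ("Enchantment", 5), ("Artifact", 6), ("Battle", 7)]

def get_type_folder_name_alt (card : List (String × List String)) : String :=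
  let normalized := (((PySem.Dict.mk card).get? "types").getD []).map (fun t => t)
  -- ranks = [RANK[t] for t in normalized if t in RANK]
  let ranks := normalized.filterMap (fun t => pvRank.get? t)
  match PySem.List.min? ranks (fun x => x) with
  | some r =>
    -- TYPE_PRIORITY[min(ranks)][1]; min(ranks) is always a valid index (0..7), so pyGet? is some
    (((PySem.List.pyGet? pvTypePriority r).map Prod.snd).getD "")
  | none =>
    match normalized with
    | [] => "8-Outros"
    | t0 :: _ =>
      let s := pvSanitize ("8-" ++ t0)
      if s = "" then "8-Outros" else s

-- ===== PRECONDITION & SPEC =====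
def Spec_get_type_folder_name (card : List (String × List String)) (out : String) : Prop := out = get_type_folder_name_alt card
instance (card : List (String × List String)) (out : String) : Decidable (Spec_get_type_folder_name card out) := by unfold Spec_get_type_folder_name; infer_instance

-- ===== CLAIM (what is proved, stated in full; the proofs are below) =====
def Claim_equal_get_type_folder_name : Prop := ∀ (card : List (String × List String)), Dom_get_type_folder_name card → Spec_get_type_folder_name card (get_type_folder_name card)

-- ===== LEMMAS AND PROOFS =====

lemma pvRankGet?_eq (t : String) :
    pvRank.get? t =
      if "Land" = t then some 0 else if "Creature" = t then some 1
      else if "Planeswalker" = t then some 2 else if "Instant" = t then some 3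
      else if "Sorcery" = t then some 4 else if "Enchantment" = t then some 5
      else if "Artifact" = t then some 6 else if "Battle" = t then some 7
      else none := by
  simp only [pvRank, PySem.Dict.get?_mk_cons, beq_iff_eq]
  rfl

-- which ranks occur in B's comprehension list
lemma pvMem_ranks (xs : List String) (r : Int) :
    r ∈ xs.filterMap (fun t => pvRank.get? t) ↔
      (r = 0 ∧ "Land" ∈ xs) ∨ (r = 1 ∧ "Creature" ∈ xs) ∨ (r = 2 ∧ "Planeswalker" ∈ xs) ∨
      (r = 3 ∧ "Instant" ∈ xs) ∨ (r = 4 ∧ "Sorcery" ∈ xs) ∨ (r = 5 ∧ "Enchantment" ∈ xs) ∨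
      (r = 6 ∧ "Artifact" ∈ xs) ∨ (r = 7 ∧ "Battle" ∈ xs) := by
  rw [List.mem_filterMap]
  constructor
  · rintro ⟨t, ht, hv⟩
    rw [pvRankGet?_eq] at hv
    split_ifs at hv <;> subst_vars <;> simp_all
  · rintro (⟨hr, h⟩|⟨hr, h⟩|⟨hr, h⟩|⟨hr, h⟩|⟨hr, h⟩|⟨hr, h⟩|⟨hr, h⟩|⟨hr, h⟩) <;>
      subst hr <;> exact ⟨_, h, by rw [pvRankGet?_eq]; rfl⟩

-- pinning min? of ranks when a least member is known
lemma pvPin (ranks : List Int) (k : Int) (hk : k ∈ ranks) (hlow : ∀ r ∈ ranks, k ≤ r) :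
    PySem.List.min? ranks (fun x => x) = some k := by
  cases h : PySem.List.min? ranks (fun x => x) with
  | none =>
    exact absurd ((PySem.List.min?_eq_none_iff _ _).mp h ▸ hk) (List.not_mem_nil)
  | some m =>
    have hmem := PySem.List.min?_mem h
    have hle := PySem.List.min?_isMin h _ hk
    have := hlow m hmem
    simp only [Option.some.injEq]
    omega

-- min(ranks) as an if-chain over memberships in xs
lemma pvMin_ranks_eq (xs : List String) :
    PySem.List.min? (xs.filterMap (fun t => pvRank.get? t)) (fun x => x) =
      if "Land" ∈ xs then some 0 else if "Creature" ∈ xs then some 1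
      else if "Planeswalker" ∈ xs then some 2 else if "Instant" ∈ xs then some 3
      else if "Sorcery" ∈ xs then some 4 else if "Enchantment" ∈ xs then some 5
      else if "Artifact" ∈ xs then some 6 else if "Battle" ∈ xs then some 7
      else none := by
  split_ifs with g0 g1 g2 g3 g4 g5 g6 g7
  · exact pvPin _ 0 ((pvMem_ranks xs 0).mpr (Or.inl ⟨rfl, g0⟩))
      (fun r hr => by rcases (pvMem_ranks xs r).mp hr with ⟨h',hm⟩|⟨h',hm⟩|⟨h',hm⟩|⟨h',hm⟩|⟨h',hm⟩|⟨h',hm⟩|⟨h',hm⟩|⟨h',hm⟩ <;> omega)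
  · exact pvPin _ 1 ((pvMem_ranks xs 1).mpr (Or.inr (Or.inl ⟨rfl, g1⟩)))
      (fun r hr => by rcases (pvMem_ranks xs r).mp hr with ⟨h',hm⟩|⟨h',hm⟩|⟨h',hm⟩|⟨h',hm⟩|⟨h',hm⟩|⟨h',hm⟩|⟨h',hm⟩|⟨h',hm⟩ <;> first | omega | exact absurd hm (by assumption))
  · exact pvPin _ 2 ((pvMem_ranks xs 2).mpr (Or.inr (Or.inr (Or.inl ⟨rfl, g2⟩))))
      (fun r hr => by rcases (pvMem_ranks xs r).mp hr with ⟨h',hm⟩|⟨h',hm⟩|⟨h',hm⟩|⟨h',hm⟩|⟨h',hm⟩|⟨h',hm⟩|⟨h',hm⟩|⟨h',hm⟩ <;> first | omega | exact absurd hm (by assumption))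
  · exact pvPin _ 3 ((pvMem_ranks xs 3).mpr (Or.inr (Or.inr (Or.inr (Or.inl ⟨rfl, g3⟩)))))
      (fun r hr => by rcases (pvMem_ranks xs r).mp hr with ⟨h',hm⟩|⟨h',hm⟩|⟨h',hm⟩|⟨h',hm⟩|⟨h',hm⟩|⟨h',hm⟩|⟨h',hm⟩|⟨h',hm⟩ <;> first | omega | exact absurd hm (by assumption))
  · exact pvPin _ 4 ((pvMem_ranks xs 4).mpr (Or.inr (Or.inr (Or.inr (Or.inr (Or.inl ⟨rfl, g4⟩))))))
      (fun r hr => by rcases (pvMem_ranks xs r).mp hr with ⟨h',hm⟩|⟨h',hm⟩|⟨h',hm⟩|⟨h',hm⟩|⟨h',hm⟩|⟨h',hm⟩|⟨h',hm⟩|⟨h',hm⟩ <;> first | omega | exact absurd hm (by assumption))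
  · exact pvPin _ 5 ((pvMem_ranks xs 5).mpr (Or.inr (Or.inr (Or.inr (Or.inr (Or.inr (Or.inl ⟨rfl, g5⟩)))))))
      (fun r hr => by rcases (pvMem_ranks xs r).mp hr with ⟨h',hm⟩|⟨h',hm⟩|⟨h',hm⟩|⟨h',hm⟩|⟨h',hm⟩|⟨h',hm⟩|⟨h',hm⟩|⟨h',hm⟩ <;> first | omega | exact absurd hm (by assumption))
  · exact pvPin _ 6 ((pvMem_ranks xs 6).mpr (Or.inr (Or.inr (Or.inr (Or.inr (Or.inr (Or.inr (Or.inl ⟨rfl, g6⟩))))))))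
      (fun r hr => by rcases (pvMem_ranks xs r).mp hr with ⟨h',hm⟩|⟨h',hm⟩|⟨h',hm⟩|⟨h',hm⟩|⟨h',hm⟩|⟨h',hm⟩|⟨h',hm⟩|⟨h',hm⟩ <;> first | omega | exact absurd hm (by assumption))
  · exact pvPin _ 7 ((pvMem_ranks xs 7).mpr (Or.inr (Or.inr (Or.inr (Or.inr (Or.inr (Or.inr (Or.inr ⟨rfl, g7⟩))))))))
      (fun r hr => by rcases (pvMem_ranks xs r).mp hr with ⟨h',hm⟩|⟨h',hm⟩|⟨h',hm⟩|⟨h',hm⟩|⟨h',hm⟩|⟨h',hm⟩|⟨h',hm⟩|⟨h',hm⟩ <;> first | omega | exact absurd hm (by assumption))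
  · rw [PySem.List.min?_eq_none_iff _ _, List.eq_nil_iff_forall_not_mem]
    intro r hr
    rcases (pvMem_ranks xs r).mp hr with ⟨_,h⟩|⟨_,h⟩|⟨_,h⟩|⟨_,h⟩|⟨_,h⟩|⟨_,h⟩|⟨_,h⟩|⟨_,h⟩ <;> exact absurd h (by assumption)

-- A's scan over TYPE_PRIORITY as the same if-chain, on the label side
lemma pvALoop_eq (xs : List String) :
    pvALoop xs pvTypePriority =
      if "Land" ∈ xs then some "0-Terreno" else if "Creature" ∈ xs then some "1-Criatura"
      else if "Planeswalker" ∈ xs then some "2-Planeswalker" else if "Instant" ∈ xs then some "3-Instant"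
      else if "Sorcery" ∈ xs then some "4-Feitiço" else if "Enchantment" ∈ xs then some "5-Encantamento"
      else if "Artifact" ∈ xs then some "6-Artefato" else if "Battle" ∈ xs then some "7-Batalha"
      else none := by
  simp only [pvALoop, pvTypePriority, List.contains_iff_mem]

-- ===== VERDICT (by name: the statement is the Claim_ definition above) =====
theorem get_type_folder_name_spec : Claim_equal_get_type_folder_name := by
  intro card _
  unfold Spec_get_type_folder_name get_type_folder_name get_type_folder_name_alt
  simp only [pvALoop_eq, pvMin_ranks_eq]
  split_ifs <;> rfl
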